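-- pv_equiv track=rewrite | github.com/cirosantilli/project-euler-solutions | solvers/937.py | compute_G_naive
-- ===== SOURCE A (Python) =====
-- MOD = 1_000_000_007
--
-- def _is_relevant_odd_prime(p: int) -> bool:
--     # Relevant odd primes are inert in Z[sqrt(-2)]: p % 8 in {5, 7}.
--     return (p & 7) == 5 or (p & 7) == 7
--
-- def compute_G_naive(n: int, mod: int = MOD) -> int:
--     """Reference implementation for small n (trial division + dict)."""
--     fact = 1
--     ans = 0
--
--     # Track parity(popcount(exponent)) for relevant primes only.
--     exps: dict[int, int] = {}
--     global_par = 0  # 0 => in A, 1 => in B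
--
--     exp2 = 0
--     par2 = 0
--
--     for k in range(1, n + 1):
--         fact = (fact * k) % mod
--
--         x = k
--         if (x & 1) == 0:
--             # v2(x) = trailing zeros
--             tz = (x & -x).bit_length() - 1
--             if tz:
--                 exp2_new = exp2 + tz
--                 par2_new = exp2_new.bit_count() & 1
--                 if par2_new != par2:
--                     global_par ^= 1
--                     par2 = par2_new
--                 exp2 = exp2_new
--                 x >>= tz
--
--         d = 3
--         while d * d <= x:
--             if x % d == 0:
--                 e = 0
--                 while x % d == 0:
--                     x //= d
--                     e += 1
--                 if _is_relevant_odd_prime(d):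
--                     old = exps.get(d, 0)
--                     new = old + e
--                     exps[d] = new
--                     if (old.bit_count() ^ new.bit_count()) & 1:
--                         global_par ^= 1
--             d += 2
--
--         if x > 1 and _is_relevant_odd_prime(x):
--             old = exps.get(x, 0)
--             new = old + 1
--             exps[x] = new
--             if (old.bit_count() ^ new.bit_count()) & 1:
--                 global_par ^= 1
--
--         if global_par == 0:
--             ans += fact
--             ans %= mod
--
--     return ans
-- ===== SOURCE B (Python) =====
-- MOD = 1_000_000_007
--
-- def compute_G_naive(n: int, mod: int = MOD) -> int:
--     """Sieve-based re-implementation: smallest-prime-factor table, then each k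
--     factorizes in O(log k) instead of trial division up to sqrt(k)."""
--     spf = list(range(n + 1))
--     for i in range(2, n + 1):
--         if spf[i] == i:  # i is prime
--             for j in range(2 * i, n + 1, i):
--                 if spf[j] == j:
--                     spf[j] = i
--
--     exps = {}
--     odd_par = 0  # parity of the number of tracked primes with odd popcount exponent
--     fact = 1
--     ans = 0
--     for k in range(1, n + 1):
--         fact = fact * k % mod
--         x = k
--         while x > 1:
--             p = spf[x]
--             e = 0
--             while x % p == 0:
--                 x //= p
--                 e += 1
--             if p == 2 or p % 8 in (5, 7):
--                 old = exps.get(p, 0)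
--                 new = old + e
--                 exps[p] = new
--                 if (old.bit_count() ^ new.bit_count()) & 1:
--                     odd_par ^= 1
--         if odd_par == 0:
--             ans = (ans + fact) % mod
--     return ans
-- ===== Notes on version B (the rewrite author's own statement) =====
-- stated objective: faster
-- what changed: Replaces per-k trial division up to sqrt(k) (with bit-trick handling of the prime 2) by a precomputed smallest-prime-factor sieve, so each k factorizes by repeated table lookup in O(log k); the prime 2 is handled uniformly by the same dict instead of dedicated exp2/par2 counters.
import Mathlib
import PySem

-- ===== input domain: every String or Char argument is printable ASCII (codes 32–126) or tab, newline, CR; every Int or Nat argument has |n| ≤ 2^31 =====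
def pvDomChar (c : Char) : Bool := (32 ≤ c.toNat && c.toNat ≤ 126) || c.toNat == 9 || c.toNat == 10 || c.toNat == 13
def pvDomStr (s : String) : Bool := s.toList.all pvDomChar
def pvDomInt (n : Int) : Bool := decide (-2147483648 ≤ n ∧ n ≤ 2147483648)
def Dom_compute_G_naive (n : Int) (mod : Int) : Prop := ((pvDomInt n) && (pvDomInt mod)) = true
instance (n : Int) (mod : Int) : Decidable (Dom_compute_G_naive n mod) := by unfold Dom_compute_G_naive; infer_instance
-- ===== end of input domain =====

-- B replaces A's per-k trial division (with bit-trick handling of the prime 2) by a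
-- precomputed smallest-prime-factor sieve: asymptotically faster factorization of each k.
-- Neither implementation mutates its arguments.

-- ===== PORT A =====

-- Shared inner while-loop `e = 0` / `while x % p == 0: x //= p; e += 1` — these lines are
-- IDENTICAL in A and in B, so both ports use this one helper.  Returns the pair (x, e).
-- At every Python call site 1 ≤ x and 2 ≤ p, so the Nat arithmetic is exact; the extra
-- conjuncts in the guard only make the recursion total (Python would not terminate there).
def pvDivOut (p x : Nat) : Nat × Nat :=
  if h : 2 ≤ p ∧ x % p = 0 ∧ 1 ≤ x then
    ((pvDivOut p (x / p)).1, (pvDivOut p (x / p)).2 + 1)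
  else (x, 0)
termination_by x
decreasing_by exact Nat.div_lt_self h.2.2 (by omega)

-- lemmas the later ports cite for termination
theorem pvDivOut_fst_le (p x : Nat) : (pvDivOut p x).1 ≤ x := by
  induction x using Nat.strong_induction_on with
  | _ x ih =>
    rw [pvDivOut]
    split
    · next h =>
      exact le_trans (ih (x / p) (Nat.div_lt_self h.2.2 (by omega))) (Nat.div_le_self x p)
    · exact le_refl x

theorem pvDivOut_fst_lt {p x : Nat} (h2 : 2 ≤ p) (hx : 1 ≤ x) (hd : x % p = 0) :
    (pvDivOut p x).1 < x := by
  rw [pvDivOut, dif_pos ⟨h2, hd, hx⟩]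
  exact lt_of_le_of_lt (pvDivOut_fst_le p (x / p)) (Nat.div_lt_self hx (by omega))

-- `_is_relevant_odd_prime(p)`: (p & 7) == 5 or (p & 7) == 7  (p ≥ 3 at call sites: Nat-exact)
def pvAIsRelevant (p : Nat) : Bool := (p &&& 7) == 5 || (p &&& 7) == 7

-- the dict/parity update block
--   old = exps.get(p, 0); new = old + e; exps[p] = new
--   if (old.bit_count() ^ new.bit_count()) & 1: par ^= 1
-- these lines are IDENTICAL in A (with par = global_par) and in B (with par = odd_par).
-- Exponents are nonnegative Python ints, so Nat is exact.
def pvUpd (p e : Nat) (exps : PySem.Dict Nat Nat) (par : Nat) : PySem.Dict Nat Nat × Nat :=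
  let old := exps.getD p 0
  let new := old + e
  (exps.insert p new,
    if (PySem.Int.bitCount (old : Int) ^^^ PySem.Int.bitCount (new : Int)) &&& 1 ≠ 0
    then par ^^^ 1 else par)

-- A's trial-division loop `d = 3` / `while d * d <= x: ...` / `d += 2`.
-- Returns (x, exps, global_par) after the loop.
def pvATrial (d x : Nat) (exps : PySem.Dict Nat Nat) (gpar : Nat) :
    Nat × PySem.Dict Nat Nat × Nat :=
  if d * d ≤ x then
    if x % d = 0 then
      let r := pvDivOut d x
      let s := if pvAIsRelevant d then pvUpd d r.2 exps gpar else (exps, gpar)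
      pvATrial (d + 2) r.1 s.1 s.2
    else pvATrial (d + 2) x exps gpar
  else (x, exps, gpar)
termination_by (x, x + 4 - d)
decreasing_by
  · -- divide-out branch
    rename_i hdx hmod
    by_cases hc : 2 ≤ d ∧ 1 ≤ x
    · exact Prod.Lex.left _ _ (pvDivOut_fst_lt hc.1 hc.2 hmod)
    · have hx : (pvDivOut d x).1 = x := by
        rw [pvDivOut]
        rw [dif_neg (by tauto)]
      rw [hx]
      refine Prod.Lex.right _ ?_
      have hdle : d ≤ x ∨ d = 0 := by
        rcases Nat.eq_zero_or_pos d with h | h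
        · exact Or.inr h
        · exact Or.inl (le_trans (Nat.le_mul_of_pos_left d h) hdx)
      omega
  · rename_i hdx _hmod
    refine Prod.Lex.right _ ?_
    have hdle : d ≤ x ∨ d = 0 := by
      rcases Nat.eq_zero_or_pos d with h | h
      · exact Or.inr h
      · exact Or.inl (le_trans (Nat.le_mul_of_pos_left d h) hdx)
    omega

structure PvAState where
  fact : Int
  ans : Int
  exps : PySem.Dict Nat Nat
  gpar : Nat
  exp2 : Nat
  par2 : Nat
deriving Repr, DecidableEq

-- the power-of-two block of A's loop body:
-- `if (x & 1) == 0: tz = (x & -x).bit_length() - 1; if tz: ...; x >>= tz`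
-- returns (x, global_par, exp2, par2) after the block
def pvATwoBlock (x0 gpar exp2 par2 : Nat) : Nat × Nat × Nat × Nat :=
  if x0 &&& 1 = 0 then
    let tz : Nat := PySem.Int.bitLength (PySem.Int.band (x0 : Int) (-(x0 : Int))) - 1
    if tz ≠ 0 then
      let exp2_new := exp2 + tz
      let par2_new := PySem.Int.bitCount ((exp2_new : Nat) : Int) &&& 1
      if par2_new ≠ par2 then (x0 >>> tz, gpar ^^^ 1, exp2_new, par2_new)
      else (x0 >>> tz, gpar, exp2_new, par2)
    else (x0, gpar, exp2, par2)
  else (x0, gpar, exp2, par2)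

-- one iteration of A's `for k in range(1, n + 1)` body (1 ≤ k there, so `x = k` as a Nat is exact)
def pvAStep (mod : Int) (s : PvAState) (k : Int) : PvAState :=
  let fact := PySem.Int.mod (s.fact * k) mod
  let x0 : Nat := k.toNat
  let t := pvATwoBlock x0 s.gpar s.exp2 s.par2
  let tr := pvATrial 3 t.1 s.exps t.2.1
  -- `if x > 1 and _is_relevant_odd_prime(x): ...`
  let fin : PySem.Dict Nat Nat × Nat :=
    if 1 < tr.1 ∧ pvAIsRelevant tr.1 then pvUpd tr.1 1 tr.2.1 tr.2.2 else (tr.2.1, tr.2.2)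
  let ans := if fin.2 = 0 then PySem.Int.mod (s.ans + fact) mod else s.ans
  ⟨fact, ans, fin.1, fin.2, t.2.2.1, t.2.2.2⟩

def compute_G_naive (n : Int) (mod : Int) : Int :=
  ((PySem.List.pyRange 1 (n + 1) 1).foldl (pvAStep mod) ⟨1, 0, PySem.Dict.empty, 0, 0, 0⟩).ans

-- ===== PORT B =====

-- inner sieve loop: `for j in range(2 * i, n + 1, i): if spf[j] == j: spf[j] = i`
-- (1 ≤ i at every call; the `1 ≤ i` guard conjunct only makes the recursion total)
def pvSieveInner (i N : Nat) (j : Nat) (spf : List Nat) : List Nat :=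
  if _h : j ≤ N ∧ 1 ≤ i then
    pvSieveInner i N (j + i) (if spf.getD j 0 = j then spf.set j i else spf)
  else spf
termination_by N + 1 - j
decreasing_by omega

-- outer sieve loop: `for i in range(2, n + 1): if spf[i] == i: <inner>`
def pvSieveOuter (N : Nat) (i : Nat) (spf : List Nat) : List Nat :=
  if i ≤ N then
    pvSieveOuter N (i + 1) (if spf.getD i 0 = i then pvSieveInner i N (2 * i) spf else spf)
  else spf
termination_by N + 1 - i
decreasing_by omega

-- `p == 2 or p % 8 in (5, 7)`  (p ≥ 0 always, so Nat `%` is exact)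
def pvBIsRelevant (p : Nat) : Bool := p == 2 || p % 8 == 5 || p % 8 == 7

-- B's per-k factor loop: `while x > 1: p = spf[x]; <divide out>; <update>`.
-- The `r.1 < x` guard only makes the recursion total; it holds whenever spf is a
-- correct smallest-prime-factor table (p divides x and 2 ≤ p), which is the case at
-- every call from compute_G_naive_alt.
def pvBFactor (spf : List Nat) (x : Nat) (exps : PySem.Dict Nat Nat) (par : Nat) :
    PySem.Dict Nat Nat × Nat :=
  if 1 < x then
    let p := spf.getD x 0
    let r := pvDivOut p x
    let s := if pvBIsRelevant p then pvUpd p r.2 exps par else (exps, par)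
    if _h : r.1 < x then pvBFactor spf r.1 s.1 s.2 else s
  else (exps, par)
termination_by x

structure PvBState where
  fact : Int
  ans : Int
  exps : PySem.Dict Nat Nat
  par : Nat
deriving Repr, DecidableEq

-- one iteration of B's `for k in range(1, n + 1)` body (1 ≤ k there, so `x = k` as a Nat is exact)
def pvBStep (mod : Int) (spf : List Nat) (s : PvBState) (k : Int) : PvBState :=
  let fact := PySem.Int.mod (s.fact * k) mod
  let r := pvBFactor spf k.toNat s.exps s.par
  let ans := if r.2 = 0 then PySem.Int.mod (s.ans + fact) mod else s.ans
  ⟨fact, ans, r.1, r.2⟩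

def compute_G_naive_alt (n : Int) (mod : Int) : Int :=
  -- spf = list(range(n + 1)) (Python range clamps a negative bound to empty, as toNat does)
  let spf := pvSieveOuter n.toNat 2 (List.range (n + 1).toNat)
  ((PySem.List.pyRange 1 (n + 1) 1).foldl (pvBStep mod spf) ⟨1, 0, PySem.Dict.empty, 0⟩).ans

-- ===== PRECONDITION & SPEC =====
-- Pre_ excludes exactly mod = 0 with 1 ≤ n, where the Python A (and B) raises ZeroDivisionError.
def Pre_compute_G_naive (n : Int) (mod : Int) : Prop := n < 1 ∨ mod ≠ 0
instance (n : Int) (mod : Int) : Decidable (Pre_compute_G_naive n mod) := by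
  unfold Pre_compute_G_naive; infer_instance

def pvWitness_compute_G_naive : Int × Int := (12, 97)

def Spec_compute_G_naive (n : Int) (mod : Int) (out : Int) : Prop := out = compute_G_naive_alt n mod
instance (n : Int) (mod : Int) (out : Int) : Decidable (Spec_compute_G_naive n mod out) := by
  unfold Spec_compute_G_naive; infer_instance

-- ===== CLAIM (what is proved, stated in full; the proofs are below) =====
def Claim_equal_compute_G_naive : Prop := ∀ (n : Int) (mod : Int), Dom_compute_G_naive n mod → Pre_compute_G_naive n mod → Spec_compute_G_naive n mod (compute_G_naive n mod)

-- ===== LEMMAS AND PROOFS =====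

-- ---- pvDivOut: the divide-out loop computes the p-adic valuation and cofactor ----

theorem pvDivOut_spec {p x : Nat} (hp : p.Prime) (hx : 1 ≤ x) :
    pvDivOut p x = (x / p ^ x.factorization p, x.factorization p) := by
  induction x using Nat.strong_induction_on with
  | _ x ih =>
    by_cases hd : p ∣ x
    · have hmod : x % p = 0 := Nat.dvd_iff_mod_eq_zero.mp hd
      rw [pvDivOut, dif_pos ⟨hp.two_le, hmod, hx⟩]
      have hxp : 1 ≤ x / p := (Nat.one_le_div_iff hp.pos).2 (Nat.le_of_dvd hx hd)
      rw [ih (x / p) (Nat.div_lt_self hx hp.one_lt) hxp]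
      have hv : 0 < x.factorization p := hp.factorization_pos_of_dvd (by omega) hd
      have hfd : (x / p).factorization p = x.factorization p - 1 := by
        rw [Nat.factorization_div hd]
        simp [hp.factorization_self]
      rw [hfd]
      simp only [Prod.mk.injEq]
      refine ⟨?_, ?_⟩
      · show x / p / p ^ (x.factorization p - 1) = x / p ^ x.factorization p
        rw [Nat.div_div_eq_div_mul]
        congr 1
        rw [← pow_succ']
        congr 1
        omega
      · omega
    · rw [pvDivOut, dif_neg]
      · rw [Nat.factorization_eq_zero_of_not_dvd hd]
        simp
      · rintro ⟨-, hmod, -⟩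
        exact hd (Nat.dvd_of_mod_eq_zero hmod)

theorem pvDivOut_fst_pos {p x : Nat} (hp : p.Prime) (hx : 1 ≤ x) : 1 ≤ (pvDivOut p x).1 := by
  rw [pvDivOut_spec hp hx]
  exact Nat.ordCompl_pos p (by omega)

theorem pvDivOut_not_dvd {p x : Nat} (hp : p.Prime) (hx : 1 ≤ x) : ¬ p ∣ (pvDivOut p x).1 := by
  rw [pvDivOut_spec hp hx]
  exact Nat.not_dvd_ordCompl hp (by omega)

theorem pvDivOut_fst_dvd {p x : Nat} (hp : p.Prime) (hx : 1 ≤ x) : (pvDivOut p x).1 ∣ x := by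
  rw [pvDivOut_spec hp hx]
  exact Nat.ordCompl_dvd x p

-- ---- factor groups: the ascending (prime, multiplicity) decomposition both loops follow ----

def pvFG (x : Nat) : List (Nat × Nat) :=
  if _h : 1 < x then
    (x.minFac, (pvDivOut x.minFac x).2) :: pvFG (pvDivOut x.minFac x).1
  else []
termination_by x
decreasing_by
  exact pvDivOut_fst_lt (Nat.minFac_prime (by omega)).two_le (by omega)
    (Nat.dvd_iff_mod_eq_zero.mp (Nat.minFac_dvd x))

theorem pvFG_nil {x : Nat} (h : x ≤ 1) : pvFG x = [] := by
  rw [pvFG, dif_neg (by omega)]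

theorem pvFG_cons {x : Nat} (h : 1 < x) :
    pvFG x = (x.minFac, x.factorization x.minFac) ::
      pvFG (x / x.minFac ^ x.factorization x.minFac) := by
  rw [pvFG, dif_pos h, pvDivOut_spec (Nat.minFac_prime (by omega)) (by omega)]

theorem pvFG_mem {x : Nat} (hx : 1 ≤ x) {u : Nat × Nat} (hu : u ∈ pvFG x) :
    u.1.Prime ∧ u.1 ∣ x ∧ 1 ≤ u.2 := by
  induction x using Nat.strong_induction_on with
  | _ x ih =>
    by_cases h : 1 < x
    · have hp : x.minFac.Prime := Nat.minFac_prime (by omega)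
      rw [pvFG, dif_pos h] at hu
      rcases List.mem_cons.1 hu with h1 | h1
      · subst h1
        refine ⟨hp, Nat.minFac_dvd x, ?_⟩
        have := pvDivOut_spec hp (by omega : 1 ≤ x)
        rw [this]
        exact hp.factorization_pos_of_dvd (by omega) (Nat.minFac_dvd x)
      · have hlt := pvDivOut_fst_lt hp.two_le (by omega : 1 ≤ x)
          (Nat.dvd_iff_mod_eq_zero.mp (Nat.minFac_dvd x))
        have hpos := pvDivOut_fst_pos hp (by omega : 1 ≤ x)
        have := ih _ hlt hpos h1
        exact ⟨this.1, this.2.1.trans (pvDivOut_fst_dvd hp (by omega)), this.2.2⟩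
    · rw [pvFG_nil (by omega)] at hu
      simp at hu

-- ---- bit tricks: (x & -x).bit_length() - 1 is the 2-adic valuation ----

theorem pv_and_bit (y z : Nat) (b c : Bool) :
    (2 * y + b.toNat) &&& (2 * z + c.toNat) = 2 * (y &&& z) + (b && c).toNat := by
  have h := Nat.bitwise_bit (f := and) rfl b y c z
  simp only [Nat.bit, HAnd.hAnd, AndOp.and, Nat.land] at h ⊢
  cases b <;> cases c <;> simpa [Bool.toNat, mul_comm, Nat.add_comm] using h

theorem pv_odd_and_pred {a : Nat} (h : a % 2 = 1) : a &&& (a - 1) = a - 1 := by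
  have ha : a = 2 * (a / 2) + (true : Bool).toNat := by simp [Bool.toNat]; omega
  have hb : a - 1 = 2 * (a / 2) + (false : Bool).toNat := by simp [Bool.toNat]; omega
  calc a &&& (a - 1) = (2 * (a / 2) + (true : Bool).toNat) &&& (2 * (a / 2) + (false : Bool).toNat) := by
        rw [← ha, ← hb]
    _ = 2 * (a / 2 &&& a / 2) + ((true : Bool) && false).toNat := pv_and_bit _ _ _ _
    _ = a - 1 := by simp [Nat.and_self, Bool.toNat]; omega

theorem pv_lowbit (v a : Nat) (ha : a % 2 = 1) :
    (2 ^ v * a) &&& (2 ^ v * a - 1) = 2 ^ v * a - 2 ^ v := by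
  induction v with
  | zero => simpa using pv_odd_and_pred ha
  | succ v ihv =>
    have ha1 : 1 ≤ a := by omega
    have h5 : 2 ^ (v + 1) * a = 2 * (2 ^ v * a) := by ring
    have h6 : (2 : Nat) ^ (v + 1) = 2 * 2 ^ v := by ring
    have h4 : 2 ^ v ≤ 2 ^ v * a := Nat.le_mul_of_pos_right _ (by omega)
    have hpos : 1 ≤ 2 ^ v * a := Nat.one_le_iff_ne_zero.2 (by positivity)
    have h1 : 2 ^ (v + 1) * a = 2 * (2 ^ v * a) + (false : Bool).toNat := by
      simp only [Bool.toNat_false, Nat.add_zero]; ring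
    have h2 : 2 ^ (v + 1) * a - 1 = 2 * (2 ^ v * a - 1) + (true : Bool).toNat := by
      simp only [Bool.toNat_true]; omega
    calc 2 ^ (v + 1) * a &&& (2 ^ (v + 1) * a - 1)
        = (2 * (2 ^ v * a) + (false : Bool).toNat) &&& (2 * (2 ^ v * a - 1) + (true : Bool).toNat) := by
          rw [← h1, ← h2]
      _ = 2 * ((2 ^ v * a) &&& (2 ^ v * a - 1)) + ((false : Bool) && true).toNat := pv_and_bit _ _ _ _
      _ = 2 ^ (v + 1) * a - 2 ^ (v + 1) := by
          rw [ihv]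
          simp only [Bool.false_and, Bool.toNat_false]
          clear h1 h2
          omega

theorem pv_sub_and_pred {x : Nat} (hx : 0 < x) :
    x - (x &&& (x - 1)) = 2 ^ x.factorization 2 := by
  have hself := Nat.ordProj_mul_ordCompl_eq_self x 2
  have hodd : (x / 2 ^ x.factorization 2) % 2 = 1 := by
    have := Nat.not_dvd_ordCompl Nat.prime_two (by omega : x ≠ 0)
    omega
  have hlow := pv_lowbit (x.factorization 2) (x / 2 ^ x.factorization 2) hodd
  rw [hself] at hlow
  rw [hlow]
  have hle : 2 ^ x.factorization 2 ≤ x := by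
    conv_rhs => rw [← hself]
    have hpos := Nat.ordCompl_pos 2 (by omega : x ≠ 0)
    nlinarith
  exact Nat.sub_sub_self hle

theorem pv_band_neg {x : Nat} (hx : 0 < x) :
    PySem.Int.band (x : Int) (-(x : Int)) = ((2 ^ x.factorization 2 : Nat) : Int) := by
  have h1 : (0 : Int) ≤ (x : Int) := by positivity
  have h2 : ¬ ((0 : Int) ≤ -(x : Int)) := by omega
  simp only [PySem.Int.band, if_pos h1, if_neg h2]
  have h3 : (-(-(x : Int)) - 1).toNat = x - 1 := by omega
  have h4 : (x : Int).toNat = x := by omega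
  rw [h3, h4, ← pv_sub_and_pred hx]

theorem pv_bitLength_two_pow (v : Nat) : PySem.Int.bitLength ((2 ^ v : Nat) : Int) = v + 1 := by
  induction v with
  | zero =>
    have := PySem.Int.bitLength_natCast (m := 1) (by omega)
    simpa [PySem.Int.bitLength_zero] using this
  | succ v ihv =>
    have h := PySem.Int.bitLength_natCast (m := 2 ^ (v + 1)) (by positivity)
    have h2 : (2 : Nat) ^ (v + 1) / 2 = 2 ^ v := by
      rw [pow_succ]
      omega
    rw [h, h2, ihv]

theorem pv_tz {x : Nat} (hx : 0 < x) :
    PySem.Int.bitLength (PySem.Int.band (x : Int) (-(x : Int))) - 1 = x.factorization 2 := by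
  rw [pv_band_neg hx, pv_bitLength_two_pow]
  omega

-- ---- parity bookkeeping: the two flip conditions agree ----

theorem pv_parity_flip (a b : Nat) : ((a ^^^ b) &&& 1 ≠ 0) ↔ (b &&& 1 ≠ a &&& 1) := by
  rw [Nat.and_xor_distrib_right]
  have ha := Nat.and_one_is_mod a
  have hb := Nat.and_one_is_mod b
  have ha2 : a % 2 = 0 ∨ a % 2 = 1 := by omega
  have hb2 : b % 2 = 0 ∨ b % 2 = 1 := by omega
  rcases ha2 with h | h <;> rcases hb2 with h' | h' <;> simp [ha, hb, h, h']

-- ---- canonical update functions (what one (p, e) factor group does to each state) ----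

-- the pair state shared by both loops: (exps dict, parity accumulator)
def pvUpdOdd (s : PySem.Dict Nat Nat × Nat) (u : Nat × Nat) : PySem.Dict Nat Nat × Nat :=
  if pvAIsRelevant u.1 then pvUpd u.1 u.2 s.1 s.2 else s

def pvUpdB (s : PySem.Dict Nat Nat × Nat) (u : Nat × Nat) : PySem.Dict Nat Nat × Nat :=
  if pvBIsRelevant u.1 then pvUpd u.1 u.2 s.1 s.2 else s

-- A's full per-k dict state: (exps, global_par, exp2, par2)
def pvUpdA (s : PySem.Dict Nat Nat × Nat × Nat × Nat) (u : Nat × Nat) :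
    PySem.Dict Nat Nat × Nat × Nat × Nat :=
  if u.1 = 2 then
    let exp2_new := s.2.2.1 + u.2
    let par2_new := PySem.Int.bitCount (exp2_new : Int) &&& 1
    (s.1, (if par2_new ≠ s.2.2.2 then s.2.1 ^^^ 1 else s.2.1), exp2_new, par2_new)
  else
    let t := pvUpdOdd (s.1, s.2.1) u
    (t.1, t.2, s.2.2.1, s.2.2.2)

theorem pv_foldl_pvUpdA_no_two (l : List (Nat × Nat)) (h : ∀ u ∈ l, u.1 ≠ 2)
    (E : PySem.Dict Nat Nat) (g e2 p2 : Nat) :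
    l.foldl pvUpdA (E, g, e2, p2) =
      ((l.foldl pvUpdOdd (E, g)).1, (l.foldl pvUpdOdd (E, g)).2, e2, p2) := by
  induction l generalizing E g with
  | nil => rfl
  | cons u l ihl =>
    simp only [List.foldl_cons]
    have hu : u.1 ≠ 2 := h u (List.mem_cons_self ..)
    rw [pvUpdA, if_neg hu]
    exact ihl (fun v hv => h v (List.mem_cons_of_mem _ hv)) _ _

-- ---- A's trial-division loop, with the trailing leftover test, follows the factor groups ----

theorem pvATrial_eq (d x : Nat) (E : PySem.Dict Nat Nat) (gpar : Nat) :
    x % 2 = 1 → 3 ≤ d → d % 2 = 1 → (∀ q : Nat, q.Prime → q ∣ x → d ≤ q) →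
    (if 1 < (pvATrial d x E gpar).1 ∧ pvAIsRelevant (pvATrial d x E gpar).1
     then pvUpd (pvATrial d x E gpar).1 1 (pvATrial d x E gpar).2.1 (pvATrial d x E gpar).2.2
     else ((pvATrial d x E gpar).2.1, (pvATrial d x E gpar).2.2))
      = (pvFG x).foldl pvUpdOdd (E, gpar) := by
  fun_induction pvATrial d x E gpar with
  | case1 d x E gpar hdx hmod r s ih =>
    intro hodd hd3 hdo hmin
    have hx1 : 1 ≤ x := by nlinarith
    have hx9 : 9 ≤ x := by nlinarith
    have hdvd : d ∣ x := Nat.dvd_of_mod_eq_zero hmod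
    have hdprime : d.Prime := by
      rw [Nat.prime_def_minFac]
      refine ⟨by omega, ?_⟩
      have h1 := Nat.minFac_le (show 0 < d by omega)
      have h2 := hmin d.minFac (Nat.minFac_prime (by omega)) ((Nat.minFac_dvd d).trans hdvd)
      omega
    have hdminfac : d = x.minFac := by
      have h1 := Nat.minFac_le_of_dvd hdprime.two_le hdvd
      have h2 := hmin x.minFac (Nat.minFac_prime (by omega)) (Nat.minFac_dvd x)
      omega
    have hx'odd : (pvDivOut d x).1 % 2 = 1 := by
      have hdvd' : (pvDivOut d x).1 ∣ x := pvDivOut_fst_dvd hdprime hx1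
      have h2x : ¬ 2 ∣ x := by omega
      have : ¬ 2 ∣ (pvDivOut d x).1 := fun hh => h2x (hh.trans hdvd')
      omega
    have hmin' : ∀ q : Nat, q.Prime → q ∣ (pvDivOut d x).1 → d + 2 ≤ q := by
      intro q hq hqd
      have hqx : q ∣ x := hqd.trans (pvDivOut_fst_dvd hdprime hx1)
      have h1 := hmin q hq hqx
      have h2 : q ≠ d := fun he => (pvDivOut_not_dvd hdprime hx1) (he ▸ hqd)
      rcases hq.eq_two_or_odd with h3 | h3 <;> omega
    have hrec := ih hx'odd (by omega) (by omega) hmin'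
    rw [pvFG, dif_pos (show 1 < x by nlinarith), ← hdminfac]
    simp only [List.foldl_cons]
    exact hrec
  | case2 d x E gpar hdx hmod ih =>
    intro hodd hd3 hdo hmin
    have hndvd : ¬ d ∣ x := fun hh => hmod (Nat.dvd_iff_mod_eq_zero.mp hh)
    refine ih hodd (by omega) (by omega) ?_
    intro q hq hqx
    have h1 := hmin q hq hqx
    have h2 : q ≠ d := fun he => hndvd (he ▸ hqx)
    rcases hq.eq_two_or_odd with h3 | h3 <;> omega
  | case3 d x E gpar hdx =>
    intro hodd hd3 hdo hmin
    by_cases h1 : 1 < x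
    · have hxprime : x.Prime := by
        by_contra hnp
        have hsq := Nat.minFac_sq_le_self (show 0 < x by omega) hnp
        have h2 := hmin x.minFac (Nat.minFac_prime (by omega)) (Nat.minFac_dvd x)
        have h3 : d * d ≤ x.minFac * x.minFac := Nat.mul_le_mul h2 h2
        have hps : x.minFac ^ 2 = x.minFac * x.minFac := sq x.minFac
        omega
      have hmf : x.minFac = x := Nat.Prime.minFac_eq hxprime
      have hfact : x.factorization x.minFac = 1 := by
        rw [hmf, hxprime.factorization_self]
      rw [pvFG_cons h1, hfact, hmf]
      have hdiv1 : x / x ^ 1 = 1 := by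
        simp [Nat.div_self (show 0 < x by omega)]
      rw [hdiv1, pvFG_nil (by omega)]
      simp only [List.foldl_cons, List.foldl_nil]
      unfold pvUpdOdd
      by_cases hrel : pvAIsRelevant x = true
      · rw [if_pos ⟨h1, hrel⟩]
        simp only [hrel, if_pos]
      · rw [if_neg (fun hc => hrel hc.2)]
        simp only [hrel]
        rfl
    · rw [pvFG_nil (by omega), if_neg (fun hc => absurd hc.1 (by omega))]
      rfl

-- ---- sieve correctness ----

theorem pvSieveInner_length (i N j : Nat) (spf : List Nat) :
    (pvSieveInner i N j spf).length = spf.length := by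
  fun_induction pvSieveInner with
  | case1 j spf h ih =>
    simp only [dite_eq_ite] at ih
    rw [ih]
    split <;> simp
  | case2 => rfl

theorem pvSieveInner_getD (i N : Nat) (hi : 1 ≤ i) (j : Nat) (spf : List Nat) (m : Nat)
    (hlen : spf.length = N + 1) :
    (pvSieveInner i N j spf).getD m 0 =
      if j ≤ m ∧ m ≤ N ∧ i ∣ (m - j) ∧ spf.getD m 0 = m then i else spf.getD m 0 := by
  fun_induction pvSieveInner i N j spf with
  | case1 j spf h ih =>
    simp only [dite_eq_ite] at ih
    have hlen' : (if spf.getD j 0 = j then spf.set j i else spf).length = N + 1 := by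
      split <;> simp [hlen]
    rw [ih hlen']
    by_cases hmj : m = j
    · subst hmj
      rw [if_neg (by omega)]
      by_cases hsp : spf.getD m 0 = m
      · have hc : m ≤ m ∧ m ≤ N ∧ i ∣ m - m ∧ spf.getD m 0 = m := ⟨le_refl m, h.1, by simp, hsp⟩
        rw [if_pos hsp, if_pos hc]
        have hmlt : m < spf.length := by omega
        rw [List.getD_eq_getElem?_getD, List.getElem?_set_self hmlt]
        rfl
      · rw [if_neg hsp, if_neg (fun hc => hsp hc.2.2.2)]
    · have hset : (if spf.getD j 0 = j then spf.set j i else spf).getD m 0 = spf.getD m 0 := by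
        split
        · rw [List.getD_eq_getElem?_getD, List.getElem?_set_ne (by omega), ← List.getD_eq_getElem?_getD]
        · rfl
      rw [hset]
      congr 1
      simp only [eq_iff_iff]
      constructor
      · rintro ⟨h1, h2, ⟨t, ht⟩, h4⟩
        refine ⟨by omega, h2, ⟨t + 1, ?_⟩, h4⟩
        have hit : i * (t + 1) = i * t + i := by ring
        omega
      · rintro ⟨h1, h2, ⟨t, ht⟩, h4⟩
        have htpos : 1 ≤ t := by
          rcases Nat.eq_zero_or_pos t with h0 | h0
          · subst h0
            simp at ht
            omega
          · exact h0
        have hile : i * 1 ≤ i * t := Nat.mul_le_mul_left i htpos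
        have hit : i * (t - 1) + i = i * t := by
          have ht1 : t - 1 + 1 = t := by omega
          calc i * (t - 1) + i = i * ((t - 1) + 1) := by ring
            _ = i * t := by rw [ht1]
        refine ⟨by omega, h2, ⟨t - 1, by omega⟩, h4⟩
  | case2 j spf h =>
    rw [if_neg (by omega)]

theorem pvSieveOuter_getD (N i : Nat) (spf : List Nat) :
    2 ≤ i → spf.length = N + 1 →
    (∀ m : Nat, 2 ≤ m → m ≤ N →
      spf.getD m 0 = if m.minFac < i ∧ m.minFac < m then m.minFac else m) →
    ∀ m : Nat, 2 ≤ m → m ≤ N → (pvSieveOuter N i spf).getD m 0 = m.minFac := by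
  fun_induction pvSieveOuter N i spf with
  | case1 i spf hiN ih =>
    intro hi hlen hinv
    have hIi := hinv i hi hiN
    refine ih (by omega) ?_ ?_
    · split
      · rw [pvSieveInner_length, hlen]
      · exact hlen
    · -- the new invariant at i + 1
      intro m' h2' hm'
      simp only [dite_eq_ite]
      have hp' : m'.minFac.Prime := Nat.minFac_prime (by omega)
      have hple : m'.minFac ≤ m' := Nat.minFac_le (by omega)
      by_cases hg : spf.getD i 0 = i
      · -- i is prime here
        have hiprime : i.Prime := by
          rw [Nat.prime_def_minFac]
          refine ⟨hi, ?_⟩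
          by_contra hne
          have hlt : i.minFac < i := lt_of_le_of_ne (Nat.minFac_le (by omega)) hne
          rw [if_pos ⟨hlt, hlt⟩] at hIi
          omega
        rw [if_pos hg, pvSieveInner_getD i N (by omega) (2 * i) spf m' hlen]
        have hiff : (2 * i ≤ m' ∧ m' ≤ N ∧ i ∣ m' - 2 * i ∧ spf.getD m' 0 = m')
            ↔ (m'.minFac = i ∧ m' ≠ i) := by
          constructor
          · rintro ⟨hc1, hc2, ⟨t, ht⟩, hc4⟩
            have hdvd : i ∣ m' := by
              have hexp : i * (t + 2) = i * t + 2 * i := by ring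
              exact ⟨t + 2, by omega⟩
            have hple2 : m'.minFac ≤ i := Nat.minFac_le_of_dvd hi hdvd
            have hmi : i < m' := by omega
            have : ¬ (m'.minFac < i ∧ m'.minFac < m') := by
              intro hcc
              rw [hinv m' h2' hm', if_pos hcc] at hc4
              omega
            constructor
            · by_contra hne
              exact this ⟨lt_of_le_of_ne hple2 hne, by omega⟩
            · omega
          · rintro ⟨hpi, hne⟩
            have hdvd : i ∣ m' := hpi ▸ Nat.minFac_dvd m'
            rcases hdvd with ⟨t, ht⟩
            have ht2 : 2 ≤ t := by
              rcases Nat.lt_or_ge t 2 with h0 | h0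
              · interval_cases t <;> omega
              · exact h0
            have h2im : 2 * i ≤ m' := by
              have : i * 2 ≤ i * t := Nat.mul_le_mul_left i ht2
              omega
            refine ⟨h2im, hm', ⟨t - 2, ?_⟩, ?_⟩
            · have : i * (t - 2) + i * 2 = i * t := by
                have h22 : t - 2 + 2 = t := by omega
                calc i * (t - 2) + i * 2 = i * ((t - 2) + 2) := by ring
                  _ = i * t := by rw [h22]
              omega
            · rw [hinv m' h2' hm', if_neg]
              rintro ⟨hcc, -⟩
              omega
        by_cases hc : m'.minFac = i ∧ m' ≠ i
        · rw [if_pos (hiff.2 hc), if_pos ⟨by omega, lt_of_le_of_ne hple (fun he => hc.2 (by omega))⟩]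
          omega
        · rw [if_neg (fun hx => hc (hiff.1 hx)), hinv m' h2' hm']
          by_cases hmi : m'.minFac = i
          · -- then m' = i, which is prime: both sides are m'
            have hm'i : m' = i := by
              rcases Decidable.em (m' = i) with h | h
              · exact h
              · exact absurd ⟨hmi, h⟩ hc
            rw [if_neg (by omega), if_neg (by omega)]
          · congr 1
            simp only [eq_iff_iff]
            constructor
            · rintro ⟨u1, u2⟩; exact ⟨by omega, u2⟩
            · rintro ⟨u1, u2⟩; exact ⟨by omega, u2⟩
      · -- i not hit: i is composite, and no minFac can equal it
        have hicomp : i.minFac < i := by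
          by_contra hne
          rw [if_neg (by omega)] at hIi
          exact hg hIi
        have hiNotPrime : ¬ i.Prime := by
          intro hpr
          rw [Nat.prime_def_minFac] at hpr
          omega
        have hmfne : m'.minFac ≠ i := by
          intro he
          exact hiNotPrime (he ▸ hp')
        rw [if_neg hg, hinv m' h2' hm']
        congr 1
        simp only [eq_iff_iff]
        constructor
        · rintro ⟨u1, u2⟩; exact ⟨by omega, u2⟩
        · rintro ⟨u1, u2⟩; exact ⟨by omega, u2⟩
  | case2 i spf hiN =>
    intro hi hlen hinv m h2 hm
    rw [hinv m h2 hm]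
    by_cases hpr : m.minFac = m
    · rw [if_neg (by omega)]
      omega
    · have : m.minFac < m := lt_of_le_of_ne (Nat.minFac_le (by omega)) hpr
      rw [if_pos ⟨by omega, this⟩]

theorem pvSpf_correct (N m : Nat) (h2 : 2 ≤ m) (hm : m ≤ N) :
    (pvSieveOuter N 2 (List.range (N + 1))).getD m 0 = m.minFac := by
  refine pvSieveOuter_getD N 2 (List.range (N + 1)) (by omega) (by simp) ?_ m h2 hm
  intro q hq hqN
  have : (List.range (N + 1)).getD q 0 = q := by
    rw [List.getD_eq_getElem?_getD]
    simp [Nat.lt_succ_of_le hqN]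
  rw [this, if_neg]
  rintro ⟨h1, -⟩
  exact absurd h1 (by have := (Nat.minFac_prime (by omega : q ≠ 1)).two_le; omega)

-- ---- B's factor loop follows the factor groups ----

theorem pvBFactor_eq (N : Nat) (spf : List Nat)
    (hspf : ∀ m : Nat, 2 ≤ m → m ≤ N → spf.getD m 0 = m.minFac)
    (x : Nat) : ∀ (E : PySem.Dict Nat Nat) (par : Nat), 1 ≤ x → x ≤ N →
    pvBFactor spf x E par = (pvFG x).foldl pvUpdB (E, par) := by
  induction x using Nat.strong_induction_on with
  | _ x ih =>
    intro E par hx hxN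
    by_cases h1 : 1 < x
    · have hmf : spf.getD x 0 = x.minFac := hspf x (by omega) hxN
      have hp : x.minFac.Prime := Nat.minFac_prime (by omega)
      have hdv : x % x.minFac = 0 := Nat.dvd_iff_mod_eq_zero.mp (Nat.minFac_dvd x)
      have hlt : (pvDivOut x.minFac x).1 < x := pvDivOut_fst_lt hp.two_le (by omega) hdv
      have hpos : 1 ≤ (pvDivOut x.minFac x).1 := pvDivOut_fst_pos hp (by omega)
      rw [pvBFactor, if_pos h1]
      simp only [hmf, dif_pos hlt]
      rw [pvFG, dif_pos h1]
      simp only [List.foldl_cons]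
      rw [ih _ hlt _ _ hpos (by omega)]
      rfl
    · have hx1 : x = 1 := by omega
      subst hx1
      rw [pvBFactor, if_neg (by omega), pvFG_nil (by omega)]
      rfl

-- ---- the simulation relation between A's dict state and B's ----

def pvRel (a : PySem.Dict Nat Nat × Nat × Nat × Nat) (b : PySem.Dict Nat Nat × Nat) : Prop :=
  a.2.1 = b.2 ∧ a.2.2.2 = PySem.Int.bitCount (a.2.2.1 : Int) &&& 1 ∧
  ∀ p : Nat, b.1.getD p 0 = if p = 2 then a.2.2.1 else a.1.getD p 0

theorem pvRel_upd {a : PySem.Dict Nat Nat × Nat × Nat × Nat} {b : PySem.Dict Nat Nat × Nat}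
    (u : Nat × Nat) (hu : u.1.Prime) (h : pvRel a b) : pvRel (pvUpdA a u) (pvUpdB b u) := by
  obtain ⟨EA, g, e2, p2⟩ := a
  obtain ⟨EB, par⟩ := b
  obtain ⟨p, e⟩ := u
  obtain ⟨h1, h2, h3⟩ := h
  simp only at h1 h2 h3
  have hold : EB.getD 2 0 = e2 := by rw [h3 2]; simp
  by_cases hp2 : p = 2
  · subst hp2
    have hB2 : pvBIsRelevant 2 = true := by decide
    unfold pvUpdA pvUpdB pvUpd
    simp only [hB2, if_pos]
    refine ⟨?_, by simp, ?_⟩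
    · -- the two parity flips coincide
      simp only [hold, h1]
      have hflip := pv_parity_flip (PySem.Int.bitCount (e2 : Int))
        (PySem.Int.bitCount ((e2 + e : Nat) : Int))
      by_cases hc : (PySem.Int.bitCount ((e2 + e : Nat) : Int)) &&& 1 ≠ p2
      · rw [if_pos hc, if_pos (hflip.mpr (by rw [← h2]; exact hc))]
      · rw [if_neg hc, if_neg (fun hx => hc (by rw [h2]; exact hflip.mp hx))]
    · intro q
      simp only [hold]
      rw [PySem.Dict.getD_insert]
      by_cases hq : q = 2
      · subst hq; simp
      · rw [if_neg hq, if_neg hq, h3 q, if_neg hq]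
  · have hrel_eq : pvAIsRelevant p = pvBIsRelevant p := by
      unfold pvAIsRelevant pvBIsRelevant
      have h78 : p &&& 7 = p % 8 := by
        have := Nat.and_two_pow_sub_one_eq_mod p 3
        norm_num at this
        omega
      have hne : (p == 2) = false := by simp [hp2]
      rw [h78, hne]
      simp
    have holdp : EB.getD p 0 = EA.getD p 0 := by rw [h3 p, if_neg hp2]
    unfold pvUpdA
    rw [if_neg hp2]
    unfold pvUpdB pvUpdOdd
    rw [← hrel_eq]
    by_cases hrel : pvAIsRelevant p = true
    · rw [if_pos hrel, if_pos hrel]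
      unfold pvUpd
      simp only [holdp, h1]
      refine ⟨rfl, h2, ?_⟩
      intro q
      rw [PySem.Dict.getD_insert, PySem.Dict.getD_insert]
      by_cases hq : q = p
      · subst hq
        rw [if_pos rfl, if_pos rfl, if_neg hp2]
      · rw [if_neg hq, if_neg hq, h3 q]
    · rw [if_neg hrel, if_neg hrel]
      exact ⟨h1, h2, h3⟩

theorem pvRel_fold {a b} (l : List (Nat × Nat)) (hl : ∀ u ∈ l, u.1.Prime) (h : pvRel a b) :
    pvRel (l.foldl pvUpdA a) (l.foldl pvUpdB b) := by
  induction l generalizing a b with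
  | nil => exact h
  | cons u l ihl =>
    simp only [List.foldl_cons]
    exact ihl (fun v hv => hl v (List.mem_cons_of_mem _ hv))
      (pvRel_upd u (hl u (List.mem_cons_self ..)) h)

-- ---- per-iteration characterizations of the two step functions ----

theorem pvATwoBlock_odd (x0 g e2 p2 : Nat) (h : x0 % 2 = 1) :
    pvATwoBlock x0 g e2 p2 = (x0, g, e2, p2) := by
  unfold pvATwoBlock
  rw [Nat.and_one_is_mod, if_neg (by omega)]

theorem pvATwoBlock_even (x0 g e2 p2 : Nat) (h : x0 % 2 = 0) (hx : 1 ≤ x0) :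
    pvATwoBlock x0 g e2 p2 =
      (x0 / 2 ^ x0.factorization 2,
       (if PySem.Int.bitCount (((e2 + x0.factorization 2 : Nat)) : Int) &&& 1 ≠ p2
        then g ^^^ 1 else g),
       e2 + x0.factorization 2,
       PySem.Int.bitCount (((e2 + x0.factorization 2 : Nat)) : Int) &&& 1) := by
  have hvpos : 0 < x0.factorization 2 :=
    Nat.Prime.factorization_pos_of_dvd Nat.prime_two (by omega) (by omega)
  unfold pvATwoBlock
  rw [Nat.and_one_is_mod, if_pos h]
  simp only [pv_tz (show 0 < x0 by omega)]
  rw [if_pos (show x0.factorization 2 ≠ 0 by omega), Nat.shiftRight_eq_div_pow]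
  by_cases hpp : PySem.Int.bitCount ((e2 + x0.factorization 2 : Nat) : Int) &&& 1 ≠ p2
  · rw [if_pos hpp, if_pos hpp]
  · have he : PySem.Int.bitCount ((e2 + x0.factorization 2 : Nat) : Int) &&& 1 = p2 :=
      Decidable.not_not.mp hpp
    rw [if_neg hpp, if_neg hpp, he]

theorem pvAStep_eq (mod : Int) (s : PvAState) (k : Int) (hk : 1 ≤ k) :
    pvAStep mod s k =
      ⟨PySem.Int.mod (s.fact * k) mod,
       (if ((pvFG k.toNat).foldl pvUpdA (s.exps, s.gpar, s.exp2, s.par2)).2.1 = 0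
        then PySem.Int.mod (s.ans + PySem.Int.mod (s.fact * k) mod) mod else s.ans),
       ((pvFG k.toNat).foldl pvUpdA (s.exps, s.gpar, s.exp2, s.par2)).1,
       ((pvFG k.toNat).foldl pvUpdA (s.exps, s.gpar, s.exp2, s.par2)).2.1,
       ((pvFG k.toNat).foldl pvUpdA (s.exps, s.gpar, s.exp2, s.par2)).2.2.1,
       ((pvFG k.toNat).foldl pvUpdA (s.exps, s.gpar, s.exp2, s.par2)).2.2.2⟩ := by
  have hx0 : 1 ≤ k.toNat := by omega
  simp only [pvAStep]
  by_cases hpar : k.toNat % 2 = 1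
  · -- odd k: the power-of-two block is a no-op
    have hmin : ∀ q : Nat, q.Prime → q ∣ k.toNat → 3 ≤ q := by
      intro q hq hqd
      rcases hq.eq_two_or_odd with h2 | h2
      · subst h2
        omega
      · have := hq.two_le
        omega
    have htr := pvATrial_eq 3 k.toNat s.exps s.gpar hpar (le_refl 3) rfl hmin
    have hnotwo : ∀ u ∈ pvFG k.toNat, u.1 ≠ 2 := by
      intro u hu he
      have hm := pvFG_mem hx0 hu
      have : (2 : Nat) ∣ k.toNat := he ▸ hm.2.1
      omega
    have hlift := pv_foldl_pvUpdA_no_two (pvFG k.toNat) hnotwo s.exps s.gpar s.exp2 s.par2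
    rw [pvATwoBlock_odd _ _ _ _ hpar, hlift]
    simp only []
    rw [htr]
  · -- even k: the power-of-two block consumes the (2, v₂) factor group
    have hpar0 : k.toNat % 2 = 0 := by omega
    have hk2 : 2 ≤ k.toNat := by omega
    have hne0 : k.toNat ≠ 0 := by omega
    have hvpos : 0 < (k.toNat).factorization 2 :=
      Nat.Prime.factorization_pos_of_dvd Nat.prime_two hne0 (by omega)
    have hx'pos : 1 ≤ k.toNat / 2 ^ (k.toNat).factorization 2 := Nat.ordCompl_pos 2 hne0
    have hx'odd : (k.toNat / 2 ^ (k.toNat).factorization 2) % 2 = 1 := by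
      have := Nat.not_dvd_ordCompl Nat.prime_two hne0
      omega
    have hminF : (k.toNat).minFac = 2 := (Nat.minFac_eq_two_iff _).mpr (by omega)
    have hfg : pvFG k.toNat =
        (2, (k.toNat).factorization 2) :: pvFG (k.toNat / 2 ^ (k.toNat).factorization 2) := by
      rw [pvFG_cons (by omega), hminF]
    have hmin' : ∀ q : Nat, q.Prime →
        q ∣ k.toNat / 2 ^ (k.toNat).factorization 2 → 3 ≤ q := by
      intro q hq hqd
      rcases hq.eq_two_or_odd with h2 | h2
      · subst h2
        omega
      · have := hq.two_le
        omega
    have hnotwo' : ∀ u ∈ pvFG (k.toNat / 2 ^ (k.toNat).factorization 2), u.1 ≠ 2 := by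
      intro u hu he
      have hm := pvFG_mem hx'pos hu
      have : (2 : Nat) ∣ k.toNat / 2 ^ (k.toNat).factorization 2 := he ▸ hm.2.1
      omega
    have htr := pvATrial_eq 3 (k.toNat / 2 ^ (k.toNat).factorization 2) s.exps
      (if PySem.Int.bitCount (((s.exp2 + (k.toNat).factorization 2 : Nat)) : Int) &&& 1 ≠ s.par2
       then s.gpar ^^^ 1 else s.gpar) hx'odd (le_refl 3) rfl hmin'
    have hlift := pv_foldl_pvUpdA_no_two (pvFG (k.toNat / 2 ^ (k.toNat).factorization 2)) hnotwo'
      s.exps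
      (if PySem.Int.bitCount (((s.exp2 + (k.toNat).factorization 2 : Nat)) : Int) &&& 1 ≠ s.par2
       then s.gpar ^^^ 1 else s.gpar)
      (s.exp2 + (k.toNat).factorization 2)
      (PySem.Int.bitCount (((s.exp2 + (k.toNat).factorization 2 : Nat)) : Int) &&& 1)
    rw [pvATwoBlock_even _ _ _ _ hpar0 hx0, hfg]
    simp only [List.foldl_cons]
    have hstep : pvUpdA (s.exps, s.gpar, s.exp2, s.par2) (2, (k.toNat).factorization 2) =
        (s.exps,
         (if PySem.Int.bitCount (((s.exp2 + (k.toNat).factorization 2 : Nat)) : Int) &&& 1 ≠ s.par2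
          then s.gpar ^^^ 1 else s.gpar),
         s.exp2 + (k.toNat).factorization 2,
         PySem.Int.bitCount (((s.exp2 + (k.toNat).factorization 2 : Nat)) : Int) &&& 1) := by
      rfl
    simp only [hstep, hlift, htr]

theorem pvBStep_eq (mod : Int) (N : Nat) (spf : List Nat)
    (hspf : ∀ m : Nat, 2 ≤ m → m ≤ N → spf.getD m 0 = m.minFac)
    (s : PvBState) (k : Int) (hk : 1 ≤ k) (hkN : k.toNat ≤ N) :
    pvBStep mod spf s k =
      ⟨PySem.Int.mod (s.fact * k) mod,
       (if ((pvFG k.toNat).foldl pvUpdB (s.exps, s.par)).2 = 0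
        then PySem.Int.mod (s.ans + PySem.Int.mod (s.fact * k) mod) mod else s.ans),
       ((pvFG k.toNat).foldl pvUpdB (s.exps, s.par)).1,
       ((pvFG k.toNat).foldl pvUpdB (s.exps, s.par)).2⟩ := by
  unfold pvBStep
  rw [pvBFactor_eq N spf hspf k.toNat s.exps s.par (by omega) hkN]

-- ---- the main loop ----

theorem pv_loop (mod : Int) (N : Nat) (spf : List Nat)
    (hspf : ∀ m : Nat, 2 ≤ m → m ≤ N → spf.getD m 0 = m.minFac)
    (l : List Int) (hl : ∀ k ∈ l, 1 ≤ k ∧ k.toNat ≤ N)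
    (sA : PvAState) (sB : PvBState)
    (hfact : sA.fact = sB.fact) (hans : sA.ans = sB.ans)
    (hrel : pvRel (sA.exps, sA.gpar, sA.exp2, sA.par2) (sB.exps, sB.par)) :
    (l.foldl (pvAStep mod) sA).ans = (l.foldl (pvBStep mod spf) sB).ans := by
  induction l generalizing sA sB with
  | nil => exact hans
  | cons k l ihl =>
    simp only [List.foldl_cons]
    have hk := hl k (List.mem_cons_self ..)
    have hl' := fun v hv => hl v (List.mem_cons_of_mem _ hv)
    rw [pvAStep_eq mod sA k hk.1, pvBStep_eq mod N spf hspf sB k hk.1 hk.2]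
    have hfg : ∀ u ∈ pvFG k.toNat, (u.1).Prime := by
      intro u hu
      exact (pvFG_mem (by omega : 1 ≤ k.toNat) hu).1
    have hrel' := pvRel_fold (a := (sA.exps, sA.gpar, sA.exp2, sA.par2))
      (b := (sB.exps, sB.par)) (pvFG k.toNat) hfg hrel
    refine ihl hl' _ _ ?_ ?_ ?_
    · show PySem.Int.mod (sA.fact * k) mod = PySem.Int.mod (sB.fact * k) mod
      rw [hfact]
    · show (if (List.foldl pvUpdA (sA.exps, sA.gpar, sA.exp2, sA.par2) (pvFG k.toNat)).2.1 = 0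
              then PySem.Int.mod (sA.ans + PySem.Int.mod (sA.fact * k) mod) mod else sA.ans) =
           (if (List.foldl pvUpdB (sB.exps, sB.par) (pvFG k.toNat)).2 = 0
              then PySem.Int.mod (sB.ans + PySem.Int.mod (sB.fact * k) mod) mod else sB.ans)
      rw [hfact, hans, hrel'.1]
    · exact hrel'

theorem pv_main (n : Int) (mod : Int) : compute_G_naive n mod = compute_G_naive_alt n mod := by
  unfold compute_G_naive compute_G_naive_alt
  by_cases hn : n < 1
  · rw [PySem.List.pyRange_one_eq_nil (by omega)]
    rfl
  · apply pv_loop mod n.toNat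
    · intro m h2 hmN
      have hNn : (n + 1).toNat = n.toNat + 1 := by omega
      rw [hNn]
      exact pvSpf_correct n.toNat m h2 hmN
    · intro k hk
      rw [PySem.List.mem_pyRange_one] at hk
      constructor
      · omega
      · omega
    · rfl
    · rfl
    · refine ⟨rfl, ?_, ?_⟩
      · simp [PySem.Int.bitCount_zero]
      · intro p
        simp [PySem.Dict.getD_empty]

-- ===== VERDICT (by name: the statement is the Claim_ definition above) =====
theorem compute_G_naive_spec : Claim_equal_compute_G_naive := by
  intro n mod _ _
  unfold Spec_compute_G_naive
  exact pv_main n mod
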